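-- pv_equiv track=rewrite | github.com/xKILLERDEADx/Snakebite | modules/email_harvester.py | _categorize_emails
-- ===== SOURCE A (Python) =====
-- def _categorize_emails(emails, domain):
--     """Categorize emails by type."""
--     categories = {
--         'employee': [],
--         'generic': [],
--         'external': [],
--     }
--     generic_prefixes = ['info', 'contact', 'support', 'admin', 'sales',
--                         'help', 'noreply', 'no-reply', 'webmaster', 'postmaster',
--                         'abuse', 'security', 'privacy', 'press', 'hr', 'careers']
--
--     for email in sorted(emails):
--         local_part = email.split('@')[0]
--         email_domain = email.split('@')[1]
--
--         if domain in email_domain: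
--             if local_part in generic_prefixes:
--                 categories['generic'].append(email)
--             else:
--                 categories['employee'].append(email)
--         else:
--             categories['external'].append(email)
--
--     return categories
-- ===== SOURCE B (Python) =====
-- def _categorize_emails(emails, domain):
--     """Categorize emails by type."""
--     generic_prefixes = ['info', 'contact', 'support', 'admin', 'sales',
--                         'help', 'noreply', 'no-reply', 'webmaster', 'postmaster',
--                         'abuse', 'security', 'privacy', 'press', 'hr', 'careers']
--     ordered = sorted(emails)
--     return {
--         'employee': [e for e in ordered
--                      if domain in e.split('@')[1]
--                      and e.split('@')[0] not in generic_prefixes],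
--         'generic': [e for e in ordered
--                     if domain in e.split('@')[1]
--                     and e.split('@')[0] in generic_prefixes],
--         'external': [e for e in ordered if domain not in e.split('@')[1]],
--     }
-- ===== Notes on version B (the rewrite author's own statement) =====
-- stated objective: simpler
-- what changed: A's single pass that branches and appends into a mutable dict is replaced by sorting once and building each of the three buckets with its own list comprehension (three independent filtering passes over the sorted list).
import Mathlib
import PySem

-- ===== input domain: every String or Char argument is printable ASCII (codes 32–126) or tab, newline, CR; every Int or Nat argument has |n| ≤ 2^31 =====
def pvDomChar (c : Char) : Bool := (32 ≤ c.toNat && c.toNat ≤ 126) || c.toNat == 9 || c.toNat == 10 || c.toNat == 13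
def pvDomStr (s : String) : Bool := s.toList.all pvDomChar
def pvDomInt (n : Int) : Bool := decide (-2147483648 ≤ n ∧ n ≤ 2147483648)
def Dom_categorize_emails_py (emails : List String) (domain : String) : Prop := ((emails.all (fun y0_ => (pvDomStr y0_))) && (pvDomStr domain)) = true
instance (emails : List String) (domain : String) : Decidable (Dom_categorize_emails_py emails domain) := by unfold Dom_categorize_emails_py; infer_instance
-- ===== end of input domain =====

-- ===== PORT A =====
-- A: one pass over sorted(emails), branching and appending into a mutable dict.
def categorize_emails_py (emails : List String) (domain : String) : List (String × List String) :=
  let categories : PySem.Dict String (List String) :=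
    ((PySem.Dict.empty.insert "employee" []).insert "generic" []).insert "external" []
  let generic_prefixes : List String :=
    ["info", "contact", "support", "admin", "sales",
     "help", "noreply", "no-reply", "webmaster", "postmaster",
     "abuse", "security", "privacy", "press", "hr", "careers"]
  let categories :=
    (PySem.List.sorted emails (fun x => x) false).foldl (fun cat email =>
      let parts := (PySem.Str.split? email "@").getD []
      let local_part := (PySem.List.pyGet? parts 0).getD ""
      -- parts[1] raises IndexError in Python when email has no '@'; Pre_ excludes that
      let email_domain := (PySem.List.pyGet? parts 1).getD ""
      if PySem.Str.isIn domain email_domain then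
        if generic_prefixes.contains local_part then
          cat.modify "generic" [] (fun l => l ++ [email])
        else
          cat.modify "employee" [] (fun l => l ++ [email])
      else
        cat.modify "external" [] (fun l => l ++ [email])) categories
  categories.items

-- ===== PORT B =====
-- B: sort once, then build each bucket with its own filtering pass.
def categorize_emails_py_alt (emails : List String) (domain : String) : List (String × List String) :=
  let generic_prefixes : List String :=
    ["info", "contact", "support", "admin", "sales",
     "help", "noreply", "no-reply", "webmaster", "postmaster",
     "abuse", "security", "privacy", "press", "hr", "careers"]
  let ordered := PySem.List.sorted emails (fun x => x) false
  let domOf := fun (e : String) => (PySem.List.pyGet? ((PySem.Str.split? e "@").getD []) 1).getD ""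
  let locOf := fun (e : String) => (PySem.List.pyGet? ((PySem.Str.split? e "@").getD []) 0).getD ""
  [("employee", ordered.filter (fun e => PySem.Str.isIn domain (domOf e) && !(generic_prefixes.contains (locOf e)))),
   ("generic",  ordered.filter (fun e => PySem.Str.isIn domain (domOf e) && generic_prefixes.contains (locOf e))),
   ("external", ordered.filter (fun e => !(PySem.Str.isIn domain (domOf e))))]

-- ===== PRECONDITION & SPEC =====
-- Pre_ excludes exactly the inputs on which Python A raises IndexError: an email without '@'.
def Pre_categorize_emails_py (emails : List String) (domain : String) : Prop :=
  emails.all (fun e => PySem.Str.isIn "@" e) = true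
instance (emails : List String) (domain : String) : Decidable (Pre_categorize_emails_py emails domain) := by unfold Pre_categorize_emails_py; infer_instance
def pvWitness_categorize_emails_py : List String × String :=
  (["alice@acme.com", "info@acme.com", "bob@other.org"], "acme.com")
def Spec_categorize_emails_py (emails : List String) (domain : String) (out : List (String × List String)) : Prop := out = categorize_emails_py_alt emails domain
instance (emails : List String) (domain : String) (out : List (String × List String)) : Decidable (Spec_categorize_emails_py emails domain out) := by unfold Spec_categorize_emails_py; infer_instance

-- ===== CLAIM (what is proved, stated in full; the proofs are below) =====
def Claim_equal_categorize_emails_py : Prop := ∀ (emails : List String) (domain : String), Dom_categorize_emails_py emails domain → Pre_categorize_emails_py emails domain → Spec_categorize_emails_py emails domain (categorize_emails_py emails domain)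

-- ===== LEMMAS AND PROOFS =====

-- The body of A's loop, named so the induction can rewrite one step at a time.
def stepFn (pd pg : String → Bool) (cat : PySem.Dict String (List String)) (email : String) :
    PySem.Dict String (List String) :=
  if pd email then
    if pg email then
      cat.modify "generic" [] (fun l => l ++ [email])
    else
      cat.modify "employee" [] (fun l => l ++ [email])
  else
    cat.modify "external" [] (fun l => l ++ [email])

-- Invariant of A's loop: folding the dict-append step over any list l, starting from a
-- three-bucket dict with contents a/b/c, appends the three filters of l to a, b, c.
theorem fold_items (pd pg : String → Bool) (l : List String) (a b c : List String) :
    (l.foldl (stepFn pd pg) ⟨[("employee", a), ("generic", b), ("external", c)]⟩).items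
    = [("employee", a ++ l.filter (fun e => pd e && !(pg e))),
       ("generic",  b ++ l.filter (fun e => pd e && pg e)),
       ("external", c ++ l.filter (fun e => !(pd e)))] := by
  induction l generalizing a b c with
  | nil => simp
  | cons e t ih =>
    simp only [List.foldl_cons]
    by_cases hd : pd e = true <;> by_cases hg : pg e = true
    · have h1 : stepFn pd pg ⟨[("employee", a), ("generic", b), ("external", c)]⟩ e
          = ⟨[("employee", a), ("generic", b ++ [e]), ("external", c)]⟩ := by
        simp [stepFn, hd, hg, PySem.Dict.modify, PySem.Dict.insert, PySem.Dict.contains,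
              PySem.Dict.getD, PySem.Dict.get?]
      rw [h1, ih]; simp [hd, hg]
    · have h1 : stepFn pd pg ⟨[("employee", a), ("generic", b), ("external", c)]⟩ e
          = ⟨[("employee", a ++ [e]), ("generic", b), ("external", c)]⟩ := by
        simp [stepFn, hd, hg, PySem.Dict.modify, PySem.Dict.insert, PySem.Dict.contains,
              PySem.Dict.getD, PySem.Dict.get?]
      rw [h1, ih]; simp [hd, hg]
    · have h1 : stepFn pd pg ⟨[("employee", a), ("generic", b), ("external", c)]⟩ e
          = ⟨[("employee", a), ("generic", b), ("external", c ++ [e])]⟩ := by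
        simp [stepFn, hd, PySem.Dict.modify, PySem.Dict.insert, PySem.Dict.contains,
              PySem.Dict.getD, PySem.Dict.get?]
      rw [h1, ih]; simp [hd, hg]
    · have h1 : stepFn pd pg ⟨[("employee", a), ("generic", b), ("external", c)]⟩ e
          = ⟨[("employee", a), ("generic", b), ("external", c ++ [e])]⟩ := by
        simp [stepFn, hd, PySem.Dict.modify, PySem.Dict.insert, PySem.Dict.contains,
              PySem.Dict.getD, PySem.Dict.get?]
      rw [h1, ih]; simp [hd, hg]

-- ===== VERDICT (by name: the statement is the Claim_ definition above) =====
theorem categorize_emails_py_spec : Claim_equal_categorize_emails_py := by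
  intro emails domain _ _
  unfold Spec_categorize_emails_py categorize_emails_py categorize_emails_py_alt
  exact fold_items _ _ _ [] [] []
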